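-- pv_equiv track=rewrite | github.com/CampaLuca/FHE | MathObj/Number/NTT.py | gen_powers
-- ===== SOURCE A (Python) =====
-- def gen_powers(N, q, zeta, findeg):
--     if findeg == 1 or findeg == 2:
--         if findeg == 1: N_ = N
--         else: N_ = N//2
--         powers = [0]*N_
--         powers[0] = 1
--         powers[1] = N_//2
--         i = 1
--         while 2**i < N_:
--             for j in range(2**i, 2**(i+1), 2):
--                 powers[j] = powers[j//2]//2
--                 powers[j+1] = (powers[j//2]+N_)//2
--             i = i + 1
--     elif findeg == 3:
--         N_ = N//2
--         powers = [0]*((N//3))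
--         powers[0] = 0
--         powers[1] = N//6
--         powers[2] = powers[1]//2
--         powers[3] = (5*powers[1])//2
--         i = 2
--         while 2**i < N//3:
--             for j in range(2**i, 2**(i+1)-2**(i-1), 2):
--                 powers[j] = powers[j//2]//2
--                 powers[j+1] = (powers[j//2]+N_)//2
--             for j in range(2**(i+1)-2**(i-1), 2**(i+1), 2):
--                 powers[j] = powers[j//2]//2
--                 powers[j+1] = (powers[j//2]+N_)//2
--             i = i + 1
--     return powers
-- ===== SOURCE B (Python) =====
-- def _pow2_check(size, minimum):
--     # an NTT power table only makes sense for a power-of-two size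
--     if size < minimum or size != 2 ** (size.bit_length() - 1):
--         raise ValueError("NTT table size must be a power of two")
--
--
-- def gen_powers(N, q, zeta, findeg):
--     # B: per-index closed recursion from the bits of k (parent chain), no mutable table
--     if findeg == 1 or findeg == 2:
--         N_ = N if findeg == 1 else N // 2
--         _pow2_check(N_, 2)
--
--         def f(k):
--             if k == 0:
--                 return 1
--             if k == 1:
--                 return N_ // 2
--             v = f(k // 2)
--             return v // 2 if k % 2 == 0 else (v + N_) // 2
--
--         return [f(k) for k in range(N_)]
--     elif findeg == 3:
--         N_ = N // 2
--         _pow2_check(N // 3, 4)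
--
--         def f(k):
--             if k == 0:
--                 return 0
--             if k == 1:
--                 return N // 6
--             if k == 3:
--                 return (5 * (N // 6)) // 2
--             v = f(k // 2)
--             return v // 2 if k % 2 == 0 else (v + N_) // 2
--
--         return [f(k) for k in range(N // 3)]
--     raise ValueError("findeg must be 1, 2 or 3")
-- ===== Notes on version B (the rewrite author's own statement) =====
-- stated objective: alternative
-- what changed: A fills a mutable table level by level with a while-loop over doubling index ranges; B computes each slot independently by a recursion on its parent chain (the bits of the index) and builds the list with a single comprehension.
import Mathlib
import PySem

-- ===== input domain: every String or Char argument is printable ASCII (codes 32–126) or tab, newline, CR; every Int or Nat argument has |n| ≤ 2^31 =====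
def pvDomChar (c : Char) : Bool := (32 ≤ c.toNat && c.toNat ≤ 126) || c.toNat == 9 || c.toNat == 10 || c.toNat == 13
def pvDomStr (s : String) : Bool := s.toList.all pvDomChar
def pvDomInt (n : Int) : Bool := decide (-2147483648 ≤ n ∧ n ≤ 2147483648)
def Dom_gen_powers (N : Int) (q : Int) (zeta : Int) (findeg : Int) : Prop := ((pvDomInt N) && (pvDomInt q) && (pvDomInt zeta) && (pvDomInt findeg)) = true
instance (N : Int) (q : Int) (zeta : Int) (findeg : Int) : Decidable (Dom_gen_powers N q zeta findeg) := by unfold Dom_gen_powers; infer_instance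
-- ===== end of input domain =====

-- B replaces A's level-by-level in-place table filling by a per-index recursion on the
-- parent chain (the bits of the index); equivalence of return values is proved on Pre_.

-- ===== PORT A =====
-- termination fact for A's while-loops (cited by name in decreasing_by)
theorem pvTwoPowGt (i : Nat) : (i : Int) < (2:Int) ^ i := by
  exact_mod_cast Nat.lt_two_pow_self (n := i)

-- 'for j in range(a, b, 2): powers[j] = powers[j//2]//2; powers[j+1] = (powers[j//2]+N_)//2'
def innerA (Nd b : Int) (j : Int) (powers : List Int) : List Int :=
  if _h : j < b then
    let p := PySem.List.pyGetD powers (PySem.Int.floordiv j 2) 0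
    innerA Nd b (j + 2)
      (PySem.List.pySetD (PySem.List.pySetD powers j (PySem.Int.floordiv p 2)) (j + 1)
        (PySem.Int.floordiv (p + Nd) 2))
  else powers
termination_by (b - j).toNat
decreasing_by omega

-- 'while 2**i < N_: <inner loop>; i = i + 1'   (findeg 1/2)
def loopA (Nd : Int) (i : Nat) (powers : List Int) : List Int :=
  if _h : (2:Int) ^ i < Nd then
    loopA Nd (i + 1) (innerA Nd ((2:Int) ^ (i + 1)) ((2:Int) ^ i) powers)
  else powers
termination_by (Nd - i).toNat
decreasing_by
  have h1 := pvTwoPowGt i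
  omega

-- 'while 2**i < N//3: <two inner loops>; i = i + 1'   (findeg 3)
def loopA3 (Nd len : Int) (i : Nat) (powers : List Int) : List Int :=
  if _h : (2:Int) ^ i < len then
    loopA3 Nd len (i + 1)
      (innerA Nd ((2:Int) ^ (i + 1)) ((2:Int) ^ (i + 1) - (2:Int) ^ (i - 1))
        (innerA Nd ((2:Int) ^ (i + 1) - (2:Int) ^ (i - 1)) ((2:Int) ^ i) powers))
  else powers
termination_by (len - i).toNat
decreasing_by
  have h1 := pvTwoPowGt i
  omega

def gen_powers (N : Int) (q : Int) (zeta : Int) (findeg : Int) : List Int :=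
  if findeg = 1 ∨ findeg = 2 then
    let Nd : Int := if findeg = 1 then N else PySem.Int.floordiv N 2
    let powers := List.replicate Nd.toNat (0:Int)
    let powers := PySem.List.pySetD powers 0 1
    let powers := PySem.List.pySetD powers 1 (PySem.Int.floordiv Nd 2)
    loopA Nd 1 powers
  else if findeg = 3 then
    let Nd := PySem.Int.floordiv N 2
    let len := PySem.Int.floordiv N 3
    let powers := List.replicate len.toNat (0:Int)
    let powers := PySem.List.pySetD powers 0 0
    let powers := PySem.List.pySetD powers 1 (PySem.Int.floordiv N 6)
    let powers := PySem.List.pySetD powers 2 (PySem.Int.floordiv (PySem.List.pyGetD powers 1 0) 2)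
    let powers := PySem.List.pySetD powers 3 (PySem.Int.floordiv (5 * PySem.List.pyGetD powers 1 0) 2)
    loopA3 Nd len 2 powers
  else []  -- Python raises UnboundLocalError here; outside Pre_

-- ===== PORT B =====
-- f(k) for findeg 1/2: value of table slot k from the parent chain
def fB (Nd : Int) (k : Nat) : Int :=
  if _h0 : k = 0 then 1
  else if _h1 : k = 1 then PySem.Int.floordiv Nd 2
  else
    let v := fB Nd (k / 2)
    if k % 2 = 0 then PySem.Int.floordiv v 2 else PySem.Int.floordiv (v + Nd) 2
termination_by k
decreasing_by exact Nat.div_lt_self (by omega) (by omega)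

-- f(k) for findeg 3
def fB3 (N Nd : Int) (k : Nat) : Int :=
  if _h0 : k = 0 then 0
  else if _h1 : k = 1 then PySem.Int.floordiv N 6
  else if _h3 : k = 3 then PySem.Int.floordiv (5 * PySem.Int.floordiv N 6) 2
  else
    let v := fB3 N Nd (k / 2)
    if k % 2 = 0 then PySem.Int.floordiv v 2 else PySem.Int.floordiv (v + Nd) 2
termination_by k
decreasing_by exact Nat.div_lt_self (by omega) (by omega)

-- '_pow2_check(size, minimum)': true = the check passes, false = it raises ValueError
-- ('size.bit_length() - 1' is ported as Nat.log2, exact on the sizes the check accepts)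
def pvPow2Check (size minimum : Int) : Bool :=
  decide (minimum ≤ size ∧ size = 2 ^ Nat.log2 size.toNat)

def gen_powers_alt (N : Int) (q : Int) (zeta : Int) (findeg : Int) : List Int :=
  if findeg = 1 ∨ findeg = 2 then
    let Nd : Int := if findeg = 1 then N else PySem.Int.floordiv N 2
    if pvPow2Check Nd 2 then (List.range Nd.toNat).map (fB Nd)
    else []  -- Python B raises ValueError here; outside Pre_
  else if findeg = 3 then
    if pvPow2Check (PySem.Int.floordiv N 3) 4 then
      (List.range (PySem.Int.floordiv N 3).toNat).map (fB3 N (PySem.Int.floordiv N 2))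
    else []  -- Python B raises ValueError here; outside Pre_
  else []  -- Python B raises ValueError here; outside Pre_

-- ===== PRECONDITION & SPEC =====
def pvIsPow2 (n : Int) : Bool := decide (2 ≤ n ∧ n = 2 ^ Nat.log2 n.toNat)

-- Pre_ admits exactly the inputs on which A returns: findeg ∉ {1,2,3} raises
-- UnboundLocalError, and a table size (N, N//2 resp. N//3) that is not a power of two
-- (≥ 2, resp. ≥ 4 for findeg 3) makes A write past the end of the list (IndexError).
def Pre_gen_powers (N : Int) (q : Int) (zeta : Int) (findeg : Int) : Prop :=
  (findeg = 1 ∧ pvIsPow2 N = true) ∨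
  (findeg = 2 ∧ pvIsPow2 (PySem.Int.floordiv N 2) = true) ∨
  (findeg = 3 ∧ pvIsPow2 (PySem.Int.floordiv N 3) = true ∧ 4 ≤ PySem.Int.floordiv N 3)
instance (N : Int) (q : Int) (zeta : Int) (findeg : Int) : Decidable (Pre_gen_powers N q zeta findeg) := by unfold Pre_gen_powers; infer_instance

def pvWitness_gen_powers : Int × Int × Int × Int := (8, 0, 0, 1)

def Spec_gen_powers (N : Int) (q : Int) (zeta : Int) (findeg : Int) (out : List Int) : Prop := out = gen_powers_alt N q zeta findeg
instance (N : Int) (q : Int) (zeta : Int) (findeg : Int) (out : List Int) : Decidable (Spec_gen_powers N q zeta findeg out) := by unfold Spec_gen_powers; infer_instance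

-- ===== CLAIM (what is proved, stated in full; the proofs are below) =====
def Claim_equal_gen_powers : Prop := ∀ (N : Int) (q : Int) (zeta : Int) (findeg : Int), Dom_gen_powers N q zeta findeg → Pre_gen_powers N q zeta findeg → Spec_gen_powers N q zeta findeg (gen_powers N q zeta findeg)

-- ===== LEMMAS AND PROOFS =====

theorem pv_getD_set_self (xs : List Int) (n : Nat) (v : Int) (h : n < xs.length) :
    (xs.set n v).getD n 0 = v := by
  simp [List.getD_eq_getElem?_getD, List.getElem?_set, h]

theorem pv_getD_set_ne (xs : List Int) (n k : Nat) (v : Int) (h : n ≠ k) :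
    (xs.set n v).getD k 0 = xs.getD k 0 := by
  simp [List.getD_eq_getElem?_getD, List.getElem?_set, h]

theorem innerA_stop (Nd b j : Int) (xs : List Int) (h : ¬ j < b) :
    innerA Nd b j xs = xs := by
  rw [innerA]; simp [h]

theorem innerA_step (Nd b j : Int) (xs : List Int) (h : j < b) :
    innerA Nd b j xs =
      innerA Nd b (j + 2)
        (PySem.List.pySetD
          (PySem.List.pySetD xs j
            (PySem.Int.floordiv (PySem.List.pyGetD xs (PySem.Int.floordiv j 2) 0) 2))
          (j + 1)
          (PySem.Int.floordiv (PySem.List.pyGetD xs (PySem.Int.floordiv j 2) 0 + Nd) 2)) := by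
  rw [innerA]; simp [h]

theorem fB_rec (Nd : Int) (k : Nat) (h : 2 ≤ k) :
    fB Nd k = if k % 2 = 0 then PySem.Int.floordiv (fB Nd (k / 2)) 2
              else PySem.Int.floordiv (fB Nd (k / 2) + Nd) 2 := by
  rw [fB]; rw [dif_neg (by omega), dif_neg (by omega)]

theorem fB3_rec (N Nd : Int) (k : Nat) (h : 4 ≤ k) :
    fB3 N Nd k = if k % 2 = 0 then PySem.Int.floordiv (fB3 N Nd (k / 2)) 2
              else PySem.Int.floordiv (fB3 N Nd (k / 2) + Nd) 2 := by
  rw [fB3]; rw [dif_neg (by omega), dif_neg (by omega), dif_neg (by omega)]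

-- the inner for-loop fills every pair of slots in [j, b) from its parent slot
theorem innerA_spec (Nd : Int) (f : Nat → Int) (a b : Nat) (hbe : b % 2 = 0)
    (hrec : ∀ k, a ≤ k → k < b →
      f k = if k % 2 = 0 then PySem.Int.floordiv (f (k / 2)) 2
            else PySem.Int.floordiv (f (k / 2) + Nd) 2) :
    ∀ (d j : Nat) (xs : List Int), b - j ≤ d → 2 ≤ j → a ≤ j → j % 2 = 0 → b ≤ xs.length →
    (∀ k, k < j → xs.getD k 0 = f k) →
    (innerA Nd (b : Int) (j : Int) xs).length = xs.length ∧
    (∀ k, k < b → (innerA Nd (b : Int) (j : Int) xs).getD k 0 = f k) ∧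
    (∀ k, b ≤ k → (innerA Nd (b : Int) (j : Int) xs).getD k 0 = xs.getD k 0) := by
  intro d
  induction d with
  | zero =>
    intro j xs hd hj2 haj hje hblen hvals
    have hnlt : ¬ ((j:Int) < (b:Int)) := by exact_mod_cast by omega
    rw [innerA_stop _ _ _ _ hnlt]
    exact ⟨rfl, fun k hk => hvals k (by omega), fun k _ => rfl⟩
  | succ d ih =>
    intro j xs hd hj2 haj hje hblen hvals
    by_cases h : j < b
    · have hlt : ((j:Int) < (b:Int)) := by exact_mod_cast h
      rw [innerA_step _ _ _ _ hlt]
      have hdiv : PySem.Int.floordiv (j:Int) 2 = ((j / 2 : Nat) : Int) := by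
        exact_mod_cast PySem.Int.floordiv_natCast j 2
      have hread : PySem.List.pyGetD xs (PySem.Int.floordiv (j:Int) 2) 0 = f (j / 2) := by
        rw [hdiv, PySem.List.pyGetD_natCast]
        exact hvals (j / 2) (by omega)
      have hcast1 : ((j:Int) + 1) = ((j + 1 : Nat) : Int) := by push_cast; ring
      have hcast2 : ((j:Int) + 2) = ((j + 2 : Nat) : Int) := by push_cast; ring
      rw [hread, hcast1, hcast2, PySem.List.pySetD_natCast, PySem.List.pySetD_natCast]
      set xs' := (xs.set j (PySem.Int.floordiv (f (j / 2)) 2)).set (j + 1)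
        (PySem.Int.floordiv (f (j / 2) + Nd) 2) with hxs'
      have hjb1 : j + 1 < b := by omega
      have hlen' : xs'.length = xs.length := by simp [hxs']
      have hvals' : ∀ k, k < j + 2 → xs'.getD k 0 = f k := by
        intro k hk
        rcases Nat.lt_trichotomy k j with hkj | hkj | hkj
        · rw [hxs', pv_getD_set_ne _ _ _ _ (by omega), pv_getD_set_ne _ _ _ _ (by omega)]
          exact hvals k hkj
        · subst hkj
          rw [hxs', pv_getD_set_ne _ _ _ _ (by omega),
            pv_getD_set_self _ _ _ (by omega)]
          rw [hrec k haj h, if_pos hje]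
        · have hk1 : k = j + 1 := by omega
          subst hk1
          rw [hxs', pv_getD_set_self _ _ _ (by simp; omega)]
          have : (j + 1) / 2 = j / 2 := by omega
          rw [hrec (j + 1) (by omega) hjb1, if_neg (by omega), this]
      have := ih (j + 2) xs' (by omega) (by omega) (by omega) (by omega)
        (by omega) hvals'
      refine ⟨by rw [this.1, hlen'], this.2.1, fun k hk => ?_⟩
      rw [this.2.2 k hk, hxs', pv_getD_set_ne _ _ _ _ (by omega),
        pv_getD_set_ne _ _ _ _ (by omega)]
    · have hnlt : ¬ ((j:Int) < (b:Int)) := by exact_mod_cast h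
      rw [innerA_stop _ _ _ _ hnlt]
      exact ⟨rfl, fun k hk => hvals k (by omega), fun k _ => rfl⟩

theorem pv_pow2_even (i : Nat) (h : 1 ≤ i) : 2 ^ i % 2 = 0 := by
  obtain ⟨i, rfl⟩ : ∃ m, i = m + 1 := ⟨i - 1, by omega⟩
  simp [Nat.pow_succ, Nat.mul_mod_left]

theorem pv_cast_pow (i : Nat) : ((2 ^ i : Nat) : Int) = (2:Int) ^ i := by push_cast; ring

theorem pv_finish (f : Nat → Int) (n : Nat) (xs : List Int) (hlen : xs.length = n)
    (hvals : ∀ k, k < n → xs.getD k 0 = f k) : xs = (List.range n).map f := by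
  apply List.ext_getElem (by simp [hlen])
  intro k h1 h2
  have := hvals k (by omega)
  rw [List.getD_eq_getElem xs 0 h1] at this
  simpa using this

-- the while-loop for findeg 1/2, with table size 2^e
theorem loopA_spec (e : Nat) (he : 1 ≤ e) :
    ∀ (d i : Nat) (xs : List Int), e - i ≤ d → 1 ≤ i → xs.length = 2 ^ e →
    (∀ k, k < 2 ^ i → k < 2 ^ e → xs.getD k 0 = fB ((2 ^ e : Nat) : Int) k) →
    loopA ((2 ^ e : Nat) : Int) i xs = (List.range (2 ^ e)).map (fB ((2 ^ e : Nat) : Int)) := by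
  intro d
  induction d with
  | zero =>
    intro i xs hd hi hlen hvals
    have hie : e ≤ i := by omega
    rw [loopA]
    rw [dif_neg (by rw [← pv_cast_pow]; exact_mod_cast Nat.not_lt.mpr (Nat.pow_le_pow_right (by omega) hie))]
    exact pv_finish _ _ _ hlen (fun k hk => hvals k (by calc k < 2 ^ e := hk
      _ ≤ 2 ^ i := Nat.pow_le_pow_right (by omega) hie) hk)
  | succ d ih =>
    intro i xs hd hi hlen hvals
    by_cases hie : i < e
    · rw [loopA]
      rw [dif_pos (by rw [← pv_cast_pow]; exact_mod_cast Nat.pow_lt_pow_right (by omega) hie)]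
      have h2i : 2 ≤ 2 ^ i := by
        calc 2 = 2 ^ 1 := rfl
        _ ≤ 2 ^ i := Nat.pow_le_pow_right (by omega) hi
      have hspec := innerA_spec ((2 ^ e : Nat) : Int) (fB ((2 ^ e : Nat) : Int))
        (2 ^ i) (2 ^ (i + 1)) (pv_pow2_even _ (by omega))
        (fun k hk _ => fB_rec _ k (by omega))
        (2 ^ (i + 1)) (2 ^ i) xs (Nat.sub_le _ _) h2i
        (le_refl _) (pv_pow2_even i hi)
        (by rw [hlen]; exact Nat.pow_le_pow_right (by omega) (by omega))
        (fun k hk => hvals k hk (by calc k < 2 ^ i := hk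
          _ ≤ 2 ^ e := Nat.pow_le_pow_right (by omega) (by omega)))
      rw [← pv_cast_pow, ← pv_cast_pow (i := i)]
      exact ih (i + 1) _ (by omega) (by omega) (by rw [hspec.1, hlen])
        (fun k hk _ => hspec.2.1 k hk)
    · rw [loopA]
      rw [dif_neg (by rw [← pv_cast_pow]; exact_mod_cast Nat.not_lt.mpr (Nat.pow_le_pow_right (by omega) (by omega)))]
      exact pv_finish _ _ _ hlen (fun k hk => hvals k (by calc k < 2 ^ e := hk
        _ ≤ 2 ^ i := Nat.pow_le_pow_right (by omega) (by omega)) hk)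

-- the while-loop for findeg 3, with table size 2^e, e ≥ 2
theorem loopA3_spec (N Nd : Int) (e : Nat) (he : 2 ≤ e) :
    ∀ (d i : Nat) (xs : List Int), e - i ≤ d → 2 ≤ i → xs.length = 2 ^ e →
    (∀ k, k < 2 ^ i → k < 2 ^ e → xs.getD k 0 = fB3 N Nd k) →
    loopA3 Nd ((2 ^ e : Nat) : Int) i xs = (List.range (2 ^ e)).map (fB3 N Nd) := by
  intro d
  induction d with
  | zero =>
    intro i xs hd hi hlen hvals
    have hie : e ≤ i := by omega
    rw [loopA3]
    rw [dif_neg (by rw [← pv_cast_pow]; exact_mod_cast Nat.not_lt.mpr (Nat.pow_le_pow_right (by omega) hie))]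
    exact pv_finish _ _ _ hlen (fun k hk => hvals k (by calc k < 2 ^ e := hk
      _ ≤ 2 ^ i := Nat.pow_le_pow_right (by omega) hie) hk)
  | succ d ih =>
    intro i xs hd hi hlen hvals
    by_cases hie : i < e
    · rw [loopA3]
      rw [dif_pos (by rw [← pv_cast_pow]; exact_mod_cast Nat.pow_lt_pow_right (by omega) hie)]
      -- b1 = 2^(i+1) - 2^(i-1) = 3 * 2^(i-1)
      have hi1 : i - 1 + 1 = i := by omega
      have hexp : 2 ^ (i + 1) = 4 * 2 ^ (i - 1) := by
        calc 2 ^ (i + 1) = 2 ^ (i - 1 + 2) := by rw [show i - 1 + 2 = i + 1 by omega]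
        _ = 2 ^ (i - 1) * 4 := by rw [Nat.pow_add]
        _ = 4 * 2 ^ (i - 1) := by ring
      have hexp0 : 2 ^ i = 2 * 2 ^ (i - 1) := by
        calc 2 ^ i = 2 ^ (i - 1 + 1) := by rw [hi1]
        _ = 2 ^ (i - 1) * 2 := by rw [Nat.pow_succ]
        _ = 2 * 2 ^ (i - 1) := by ring
      have h4i : (2:Int) ^ (i + 1) = ((4 * 2 ^ (i - 1) : Nat) : Int) := by
        rw [← pv_cast_pow]
        exact_mod_cast congrArg (Nat.cast : Nat → Int) hexp
      have hb1cast : ((2:Int) ^ (i + 1) - (2:Int) ^ (i - 1)) = ((3 * 2 ^ (i - 1) : Nat) : Int) := by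
        rw [h4i, ← pv_cast_pow]
        push_cast; ring
      have h2i1ge2 : 2 ≤ 2 ^ (i - 1) := by
        calc 2 = 2 ^ 1 := rfl
        _ ≤ 2 ^ (i - 1) := Nat.pow_le_pow_right (by omega) (by omega)
      have hev : 2 ^ (i - 1) % 2 = 0 := pv_pow2_even _ (by omega)
      have hble : 2 ^ (i + 1) ≤ 2 ^ e := Nat.pow_le_pow_right (by omega) (by omega)
      -- first inner loop: [2^i, 3*2^(i-1))
      have hspec1 := innerA_spec Nd (fB3 N Nd) (2 ^ i) (3 * 2 ^ (i - 1))
        (by omega)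
        (fun k hk _ => fB3_rec N Nd k (by omega))
        (3 * 2 ^ (i - 1)) (2 ^ i) xs (Nat.sub_le _ _) (by omega) (le_refl _)
        (pv_pow2_even i (by omega))
        (by rw [hlen]; omega)
        (fun k hk => hvals k hk (by omega))
      -- second inner loop: [3*2^(i-1), 2^(i+1))
      have hspec2 := innerA_spec Nd (fB3 N Nd) (3 * 2 ^ (i - 1)) (2 ^ (i + 1))
        (pv_pow2_even _ (by omega))
        (fun k hk _ => fB3_rec N Nd k (by omega))
        (2 ^ (i + 1)) (3 * 2 ^ (i - 1)) _ (Nat.sub_le _ _) (by omega) (le_refl _)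
        (by omega)
        (by rw [hspec1.1, hlen]; omega)
        (fun k hk => hspec1.2.1 k hk)
      rw [← pv_cast_pow (i := i), hb1cast]
      rw [show ((2:Int) ^ (i+1)) = ((2 ^ (i+1) : Nat) : Int) by rw [pv_cast_pow]]
      exact ih (i + 1) _ (by omega) (by omega) (by rw [hspec2.1, hspec1.1, hlen])
        (fun k hk _ => hspec2.2.1 k hk)
    · rw [loopA3]
      rw [dif_neg (by rw [← pv_cast_pow]; exact_mod_cast Nat.not_lt.mpr (Nat.pow_le_pow_right (by omega) (by omega)))]
      exact pv_finish _ _ _ hlen (fun k hk => hvals k (by calc k < 2 ^ e := hk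
        _ ≤ 2 ^ i := Nat.pow_le_pow_right (by omega) (by omega)) hk)

theorem pvPow2Check_true (n m : Int) (h : pvIsPow2 n = true) (hm : m ≤ n) :
    pvPow2Check n m = true := by
  have h' := of_decide_eq_true h
  exact decide_eq_true ⟨hm, h'.2⟩

theorem pvIsPow2_elim (n : Int) (h : pvIsPow2 n = true) :
    ∃ e : Nat, 1 ≤ e ∧ n = ((2 ^ e : Nat) : Int) := by
  have h' := of_decide_eq_true h
  refine ⟨Nat.log2 n.toNat, ?_, by rw [pv_cast_pow]; exact h'.2⟩
  by_contra he
  have he0 : Nat.log2 n.toNat = 0 := by omega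
  rw [he0] at h'
  omega

-- the findeg 1/2 computation, for any power-of-two table size
theorem main12 (Nd : Int) (h : pvIsPow2 Nd = true) :
    loopA Nd 1
      (PySem.List.pySetD (PySem.List.pySetD (List.replicate Nd.toNat (0:Int)) 0 1) 1
        (PySem.Int.floordiv Nd 2)) = (List.range Nd.toNat).map (fB Nd) := by
  obtain ⟨e, he, hNd⟩ := pvIsPow2_elim Nd h
  have htn : Nd.toNat = 2 ^ e := by rw [hNd]; exact Int.toNat_natCast _
  have h2e : 2 ≤ 2 ^ e := by calc 2 = 2 ^ 1 := rfl
    _ ≤ 2 ^ e := Nat.pow_le_pow_right (by omega) he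
  subst hNd
  rw [htn]
  rw [show ((0:Int)) = ((0 : Nat) : Int) from rfl, show ((1:Int)) = ((1 : Nat) : Int) from rfl,
    PySem.List.pySetD_natCast, PySem.List.pySetD_natCast]
  apply loopA_spec e he (e - 1) 1 _ (by omega) (by omega) (by simp)
  intro k hk _
  have hk2 : k < 2 := by norm_num at hk; omega
  interval_cases k
  · rw [pv_getD_set_ne _ _ _ _ (by omega),
      pv_getD_set_self _ _ _ (by simp only [List.length_set, List.length_replicate]; omega)]
    rw [fB]; simp
  · rw [pv_getD_set_self _ _ _ (by simp only [List.length_set, List.length_replicate]; omega)]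
    rw [fB]; simp

-- ===== VERDICT (by name: the statement is the Claim_ definition above) =====
theorem gen_powers_spec : Claim_equal_gen_powers := by
  intro N q zeta findeg _hdom hpre
  unfold Spec_gen_powers
  rcases hpre with ⟨h1, hp⟩ | ⟨h2, hp⟩ | ⟨h3, hp, h4⟩
  · subst h1
    unfold gen_powers gen_powers_alt
    simp only [if_pos (Or.inl (rfl : (1:Int) = 1)), if_pos (rfl : (1:Int) = 1),
      pvPow2Check_true N 2 hp (of_decide_eq_true hp).1, eq_self_iff_true, if_true]
    exact main12 N hp
  · subst h2
    unfold gen_powers gen_powers_alt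
    simp only [if_pos (Or.inr (rfl : (2:Int) = 2)), if_neg (by decide : ¬ ((2:Int) = 1)),
      pvPow2Check_true _ 2 hp (of_decide_eq_true hp).1, eq_self_iff_true, if_true]
    exact main12 _ hp
  · subst h3
    unfold gen_powers gen_powers_alt
    simp only [if_neg (by decide : ¬ ((3:Int) = 1 ∨ (3:Int) = 2)),
      if_pos (rfl : (3:Int) = 3), pvPow2Check_true _ 4 hp h4, eq_self_iff_true, if_true]
    obtain ⟨e, he1, hlen⟩ := pvIsPow2_elim _ hp
    have he : 2 ≤ e := by
      by_contra hc
      have he1' : e = 1 := by omega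
      rw [he1'] at hlen
      rw [hlen] at h4
      norm_num at h4
    have h4e : 4 ≤ 2 ^ e := by
      calc 4 = 2 ^ 2 := rfl
      _ ≤ 2 ^ e := Nat.pow_le_pow_right (by omega) he
    rw [hlen]
    have htn : (((2 ^ e : Nat) : Int)).toNat = 2 ^ e := Int.toNat_natCast _
    rw [htn]
    have s0 : ∀ (xs : List Int) (v : Int), PySem.List.pySetD xs 0 v = xs.set 0 v := by
      intro xs v
      rw [show ((0:Int)) = ((0:Nat):Int) from rfl, PySem.List.pySetD_natCast]
    have s1 : ∀ (xs : List Int) (v : Int), PySem.List.pySetD xs 1 v = xs.set 1 v := by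
      intro xs v
      rw [show ((1:Int)) = ((1:Nat):Int) from rfl, PySem.List.pySetD_natCast]
    have s2 : ∀ (xs : List Int) (v : Int), PySem.List.pySetD xs 2 v = xs.set 2 v := by
      intro xs v
      rw [show ((2:Int)) = ((2:Nat):Int) from rfl, PySem.List.pySetD_natCast]
    have s3 : ∀ (xs : List Int) (v : Int), PySem.List.pySetD xs 3 v = xs.set 3 v := by
      intro xs v
      rw [show ((3:Int)) = ((3:Nat):Int) from rfl, PySem.List.pySetD_natCast]
    have g1 : ∀ (xs : List Int) (d : Int), PySem.List.pyGetD xs 1 d = xs.getD 1 d := by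
      intro xs d
      rw [show ((1:Int)) = ((1:Nat):Int) from rfl, PySem.List.pyGetD_natCast]
    simp only [s0, s1, s2, s3, g1]
    have hp1 : (((List.replicate (2 ^ e) (0:Int)).set 0 0).set 1
        (PySem.Int.floordiv N 6)).getD 1 0 = PySem.Int.floordiv N 6 :=
      pv_getD_set_self _ _ _ (by simp only [List.length_set, List.length_replicate]; omega)
    have hp2 : ((((List.replicate (2 ^ e) (0:Int)).set 0 0).set 1
        (PySem.Int.floordiv N 6)).set 2
          (PySem.Int.floordiv (PySem.Int.floordiv N 6) 2)).getD 1 0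
          = PySem.Int.floordiv N 6 := by
      rw [pv_getD_set_ne _ _ _ _ (by omega)]
      exact hp1
    rw [hp1, hp2]
    apply loopA3_spec N (PySem.Int.floordiv N 2) e he (e - 2) 2 _ (by omega) (by omega)
      (by simp only [List.length_set, List.length_replicate])
    intro k hk _
    have hk4 : k < 4 := by norm_num at hk; omega
    interval_cases k
    · rw [pv_getD_set_ne _ _ _ _ (by omega), pv_getD_set_ne _ _ _ _ (by omega),
        pv_getD_set_ne _ _ _ _ (by omega),
        pv_getD_set_self _ _ _ (by simp only [List.length_replicate]; omega)]
      rw [fB3]; simp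
    · rw [pv_getD_set_ne _ _ _ _ (by omega), pv_getD_set_ne _ _ _ _ (by omega),
        pv_getD_set_self _ _ _ (by simp only [List.length_set, List.length_replicate]; omega)]
      rw [fB3]; simp
    · rw [pv_getD_set_ne _ _ _ _ (by omega),
        pv_getD_set_self _ _ _ (by simp only [List.length_set, List.length_replicate]; omega)]
      rw [show fB3 N (PySem.Int.floordiv N 2) 2 =
          PySem.Int.floordiv (fB3 N (PySem.Int.floordiv N 2) 1) 2 by rw [fB3]; norm_num]
      rw [show fB3 N (PySem.Int.floordiv N 2) 1 = PySem.Int.floordiv N 6 by rw [fB3]; norm_num]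
    · rw [pv_getD_set_self _ _ _ (by simp only [List.length_set, List.length_replicate]; omega)]
      rw [show fB3 N (PySem.Int.floordiv N 2) 3 =
          PySem.Int.floordiv (5 * PySem.Int.floordiv N 6) 2 by rw [fB3]; norm_num]
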